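-- pv_equiv track=rewrite | github.com/siakhooi/codility-fury-road-2022 | codility-solutions/solutions-2.py | solution
-- ===== SOURCE A (Python) =====
-- def cost(scooter, sand):
--     costs = [[20, 30], [5, 40]]
--     return costs[scooter][sand]
--
-- def solution(R):
--     n = len(R)
--     foot = [0] * (n+1)
--     for i in range(n-1, -1, -1):
--         foot[i] = foot[i+1] + cost(False, R[i] == 'S')
--
--     ans = foot[0]
--     c = 0
--     for i in range(n):
--         c += cost(True, R[i] == 'S')
--         ans = min(ans, c + foot[i+1])
--     return ans
-- ===== SOURCE B (Python) =====
-- def solution(R):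
--     foot_total = 0
--     best = 0
--     run = 0
--     for ch in R:
--         foot_total += 30 if ch == 'S' else 20
--         run += 10 if ch == 'S' else -15   # scooter cost minus foot cost at this position
--         if run < best:
--             best = run
--     return foot_total + best
-- ===== Notes on version B (the rewrite author's own statement) =====
-- stated objective: simpler
-- what changed: Replaces A's suffix-cost array plus second index loop by a single pass that sums foot costs and tracks the minimum running prefix sum of the per-position scooter-minus-foot cost difference.
import Mathlib
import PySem

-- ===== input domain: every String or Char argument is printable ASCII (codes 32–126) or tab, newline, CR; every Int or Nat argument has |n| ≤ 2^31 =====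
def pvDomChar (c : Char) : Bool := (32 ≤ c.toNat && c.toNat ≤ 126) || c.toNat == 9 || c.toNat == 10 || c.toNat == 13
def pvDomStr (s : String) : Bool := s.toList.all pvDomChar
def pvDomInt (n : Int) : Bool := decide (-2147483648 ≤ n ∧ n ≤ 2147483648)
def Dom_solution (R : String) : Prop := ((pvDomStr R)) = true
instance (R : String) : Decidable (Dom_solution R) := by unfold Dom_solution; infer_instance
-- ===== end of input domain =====

-- B replaces A's suffix foot-cost array and second loop by one pass summing foot
-- costs while tracking the minimum running prefix sum of (scooter − foot) cost
-- differences (objective: simpler, O(1) extra space).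

-- ===== PORT A =====
-- cost(scooter, sand): table lookup costs[scooter][sand]
def cost (scooter : Bool) (sand : Bool) : Int :=
  let costs : List (List Int) := [[20, 30], [5, 40]]
  PySem.List.pyGetD (PySem.List.pyGetD costs (if scooter then 1 else 0) [])
    (if sand then 1 else 0) 0

-- body of 'foot[i] = foot[i+1] + cost(False, R[i] == 'S')'
-- (indices produced by the range are always in [0, n), so the .toNat on the
-- write index and the 0-defaults are never exercised)
def footStep (cs : List Char) (foot : List Int) (i : Int) : List Int :=
  foot.set i.toNat
    (PySem.List.pyGetD foot (i + 1) 0 + cost false (PySem.List.pyGetD cs i ' ' == 'S'))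

-- body of the second loop, state (ans, c)
def ansStep (cs : List Char) (foot : List Int) (p : Int × Int) (i : Int) : Int × Int :=
  let c := p.2 + cost true (PySem.List.pyGetD cs i ' ' == 'S')
  (min p.1 (c + PySem.List.pyGetD foot (i + 1) 0), c)

def solution (R : String) : Int :=
  let cs := R.toList
  let n : Int := cs.length
  let foot := (PySem.List.pyRange (n - 1) (-1) (-1)).foldl (footStep cs)
                (List.replicate (cs.length + 1) 0)
  let ans := PySem.List.pyGetD foot 0 0
  ((PySem.List.pyRange 0 n 1).foldl (ansStep cs foot) (ans, 0)).1

-- ===== PORT B =====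
-- one step of B's single pass, state (foot_total, best, run)
def bStep (p : Int × Int × Int) (ch : Char) : Int × Int × Int :=
  let ft := p.1 + (if ch == 'S' then (30 : Int) else 20)
  let run := p.2.2 + (if ch == 'S' then (10 : Int) else -15)
  (ft, if run < p.2.1 then run else p.2.1, run)

def solution_alt (R : String) : Int :=
  let st := R.toList.foldl bStep (0, 0, 0)
  st.1 + st.2.1

-- ===== PRECONDITION & SPEC =====
def Spec_solution (R : String) (out : Int) : Prop := out = solution_alt R
instance (R : String) (out : Int) : Decidable (Spec_solution R out) := by unfold Spec_solution; infer_instance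

-- ===== CLAIM (what is proved, stated in full; the proofs are below) =====
def Claim_equal_solution : Prop := ∀ (R : String), Dom_solution R → Spec_solution R (solution R)

-- ===== LEMMAS AND PROOFS =====

-- total foot cost of a stretch
def ftSum (l : List Char) : Int := (l.map (fun ch => if ch == 'S' then (30 : Int) else 20)).sum

-- structural form of A's second loop
def loop2s : List Char → Int → Int → Int
  | [], ans, _ => ans
  | ch :: t, ans, c =>
      loop2s t (min ans ((c + (if ch == 'S' then (40 : Int) else 5)) + ftSum t))
        (c + (if ch == 'S' then (40 : Int) else 5))

lemma ftSum_cons (ch : Char) (t : List Char) :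
    ftSum (ch :: t) = (if ch == 'S' then (30 : Int) else 20) + ftSum t := by
  simp [ftSum]

-- A's first loop fills foot with suffix foot-cost sums
lemma foot_inv (cs : List Char) :
    ∀ (m : Nat) (L : List Int), L.length = cs.length + 1 → m ≤ cs.length →
      (∀ j : Nat, m ≤ j → j ≤ cs.length → L.getD j 0 = ftSum (cs.drop j)) →
      (((PySem.List.pyRange ((m : Int) - 1) (-1) (-1)).foldl (footStep cs) L).length
          = cs.length + 1 ∧
       ∀ j : Nat, j ≤ cs.length →
         ((PySem.List.pyRange ((m : Int) - 1) (-1) (-1)).foldl (footStep cs) L).getD j 0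
           = ftSum (cs.drop j)) := by
  intro m
  induction m with
  | zero =>
      intro L hL _ hinv
      rw [show ((0 : Nat) : Int) - 1 = -1 by norm_num,
        PySem.List.pyRange_neg_one_eq_nil le_rfl]
      exact ⟨hL, fun j hj => hinv j (Nat.zero_le j) hj⟩
  | succ m ih =>
      intro L hL hm hinv
      have hmlt : m < cs.length := hm
      rw [show ((m + 1 : Nat) : Int) - 1 = (m : Int) by push_cast; ring,
        PySem.List.pyRange_neg_one_cons (by omega), List.foldl_cons]
      apply ih
      · simp [footStep, hL]
      · omega
      · intro j hj hjn
        have hget1 : PySem.List.pyGetD L ((m : Int) + 1) 0 = ftSum (cs.drop (m + 1)) := by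
          rw [show ((m : Int) + 1) = ((m + 1 : Nat) : Int) by push_cast; ring,
            PySem.List.pyGetD_natCast]
          exact hinv (m + 1) le_rfl (by omega)
        have hch : PySem.List.pyGetD cs (m : Int) ' ' = cs[m] := by
          rw [PySem.List.pyGetD_natCast]
          exact List.getD_eq_getElem _ _ hmlt
        rcases Nat.eq_or_lt_of_le hj with hjm | hjm
        · subst hjm
          simp only [footStep, Int.toNat_natCast, hget1, hch]
          rw [List.getD_eq_getElem _ _ (by simp [hL]; omega),
            List.getElem_set_self]
          rw [show cs.drop m = cs[m] :: cs.drop (m + 1) from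
            (List.drop_eq_getElem_cons hmlt), ftSum_cons]
          have hcost : cost false (cs[m] == 'S') = (if cs[m] == 'S' then (30 : Int) else 20) := by
            by_cases h : cs[m] == 'S' <;> simp [cost, h, PySem.List.pyGetD]
          rw [hcost]; ring
        · have hne : (m : Int).toNat ≠ j := by omega
          simp only [footStep]
          rw [List.getD_eq_getElem?_getD, List.getElem?_set_ne hne,
            ← List.getD_eq_getElem?_getD]
          exact hinv j (by omega) hjn

-- A's second loop computes loop2s on the remaining suffix
lemma loop2_eq (cs : List Char) (F : List Int)
    (hF : ∀ j : Nat, j ≤ cs.length → F.getD j 0 = ftSum (cs.drop j)) :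
    ∀ (k m : Nat), cs.length - m = k → m ≤ cs.length → ∀ ans c : Int,
      ((PySem.List.pyRange (m : Int) (cs.length : Int) 1).foldl (ansStep cs F) (ans, c)).1
        = loop2s (cs.drop m) ans c := by
  intro k
  induction k with
  | zero =>
      intro m hk hm ans c
      have hme : m = cs.length := by omega
      subst hme
      rw [PySem.List.pyRange_one_eq_nil le_rfl]
      simp [loop2s]
  | succ k ih =>
      intro m hk hm ans c
      have hmlt : m < cs.length := by omega
      rw [PySem.List.pyRange_one_cons (by exact_mod_cast hmlt), List.foldl_cons]
      have hch : PySem.List.pyGetD cs (m : Int) ' ' = cs[m] := by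
        rw [PySem.List.pyGetD_natCast]
        exact List.getD_eq_getElem _ _ hmlt
      have hstep : ansStep cs F (ans, c) (m : Int)
          = (min ans ((c + cost true (cs[m] == 'S')) + ftSum (cs.drop (m + 1))),
             c + cost true (cs[m] == 'S')) := by
        simp only [ansStep, hch]
        rw [show ((m : Int) + 1) = ((m + 1 : Nat) : Int) by push_cast; ring,
          PySem.List.pyGetD_natCast, hF (m + 1) (by omega)]
      rw [hstep, show ((m : Int) + 1) = ((m + 1 : Nat) : Int) by push_cast; ring,
        ih (m + 1) (by omega) (by omega)]
      rw [show cs.drop m = cs[m] :: cs.drop (m + 1) from List.drop_eq_getElem_cons hmlt]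
      have hc : cost true (cs[m] == 'S') = (if cs[m] == 'S' then (40 : Int) else 5) := by
        by_cases h : cs[m] == 'S' <;> simp [cost, h, PySem.List.pyGetD]
      simp only [loop2s, hc]

-- the bridge: A's min-over-switch-points scan equals B's min-prefix-sum scan
lemma bridge : ∀ (l : List Char) (FT best run : Int),
    loop2s l (FT + best) (FT + run - ftSum l)
      = FT + (l.foldl (fun (p : Int × Int) ch =>
          (if p.2 + (if ch == 'S' then (10 : Int) else -15) < p.1
             then p.2 + (if ch == 'S' then (10 : Int) else -15) else p.1,
           p.2 + (if ch == 'S' then (10 : Int) else -15))) (best, run)).1 := by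
  intro l
  induction l with
  | nil => intro FT best run; simp [loop2s]
  | cons ch t ih =>
      intro FT best run
      rw [List.foldl_cons]
      simp only [loop2s, ftSum_cons]
      by_cases h : ch == 'S'
      · simp only [h, if_true]
        rw [show FT + run - (30 + ftSum t) + 40 = FT + (run + 10) - ftSum t by ring,
          show min (FT + best) (FT + (run + 10) - ftSum t + ftSum t)
              = FT + (if run + 10 < best then run + 10 else best) by
            rw [min_def]; split_ifs <;> omega]
        exact ih FT _ (run + 10)
      · simp only [h, if_false, Bool.false_eq_true]
        rw [show FT + run - (20 + ftSum t) + 5 = FT + (run + -15) - ftSum t by ring,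
          show min (FT + best) (FT + (run + -15) - ftSum t + ftSum t)
              = FT + (if run + -15 < best then run + -15 else best) by
            rw [min_def]; split_ifs <;> omega]
        exact ih FT _ (run + -15)

-- B's fold splits into (total foot cost, the best/run pair)
lemma bfold_split (l : List Char) : ∀ (a b c : Int),
    l.foldl bStep (a, b, c)
      = (a + ftSum l,
         l.foldl (fun (p : Int × Int) ch =>
          (if p.2 + (if ch == 'S' then (10 : Int) else -15) < p.1
             then p.2 + (if ch == 'S' then (10 : Int) else -15) else p.1,
           p.2 + (if ch == 'S' then (10 : Int) else -15))) (b, c)) := by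
  induction l with
  | nil => intro a b c; simp [ftSum]
  | cons ch t ih =>
      intro a b c
      rw [List.foldl_cons, List.foldl_cons, ftSum_cons]
      rw [show bStep (a, b, c) ch
          = (a + (if ch == 'S' then (30 : Int) else 20),
             if c + (if ch == 'S' then (10 : Int) else -15) < b
               then c + (if ch == 'S' then (10 : Int) else -15) else b,
             c + (if ch == 'S' then (10 : Int) else -15)) from rfl]
      rw [ih]
      ring_nf

-- ===== VERDICT (by name: the statement is the Claim_ definition above) =====
theorem solution_spec : Claim_equal_solution := by
  intro R _
  unfold Spec_solution solution solution_alt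
  set cs := R.toList with hcs
  simp only []
  have hfoot := foot_inv cs cs.length (List.replicate (cs.length + 1) 0)
    (by simp) le_rfl
    (by intro j hj hjn
        have hje : j = cs.length := by omega
        subst hje
        simp [ftSum])
  obtain ⟨_, hF⟩ := hfoot
  set F := (PySem.List.pyRange ((cs.length : Int) - 1) (-1) (-1)).foldl (footStep cs)
    (List.replicate (cs.length + 1) 0) with hFdef
  have hans0 : PySem.List.pyGetD F 0 0 = ftSum cs := by
    rw [show (0 : Int) = ((0 : Nat) : Int) from rfl, PySem.List.pyGetD_natCast]
    simpa using hF 0 (Nat.zero_le _)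
  have h2 := loop2_eq cs F hF cs.length 0 (by omega) (Nat.zero_le _) (ftSum cs) 0
  rw [show ((0 : Nat) : Int) = (0 : Int) from rfl] at h2
  rw [hans0, h2]
  rw [bfold_split cs 0 0 0]
  have hb := bridge cs (ftSum cs) 0 0
  simp only [add_zero, sub_self] at hb ⊢
  simp only [List.drop_zero]
  rw [hb]
  ring
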